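-- pv_equiv track=rewrite | github.com/maheshmasale/pythonCoding | Google/TwitterExpressionCode.py | reverseExpr
-- ===== SOURCE A (Python) =====
-- def reverseExpr(expr):
--     j = len(expr)-1
--     i = 0
--     dictParen = {")":"(","(":")"}
--
--     while i < j:
--         expr[i],expr[j] =expr[j],expr[i]
--         if expr[i] in dictParen:
--             expr[i] = dictParen[expr[i]]
--         if expr[j] in dictParen:
--             expr[j] = dictParen[expr[j]]
--         i+=1
--         j-=1
--
--     return expr
-- ===== SOURCE B (Python) =====
-- def reverseExpr(expr):
--     flip = {"(": ")", ")": "("}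
--     expr[:] = [flip.get(tok, tok) for tok in reversed(expr)]
--     return expr
-- ===== Notes on version B (the rewrite author's own statement) =====
-- stated objective: idiomatic
-- what changed: B replaces A's two-pointer swap-and-flip index loop by a single comprehension that maps every token of the reversed list through the flip table and assigns it back in place, with no index arithmetic at all.
-- intended difference: On odd-length lists whose middle element is '(' or ')', A's two-pointer loop never visits the middle index and returns it unflipped, while B flips it like every other parenthesis; flipping all parentheses is the intended behaviour of reversing an expression. — e.g. on reverseExpr(["("]): A returns ["("], B returns [")"]
import Mathlib
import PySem

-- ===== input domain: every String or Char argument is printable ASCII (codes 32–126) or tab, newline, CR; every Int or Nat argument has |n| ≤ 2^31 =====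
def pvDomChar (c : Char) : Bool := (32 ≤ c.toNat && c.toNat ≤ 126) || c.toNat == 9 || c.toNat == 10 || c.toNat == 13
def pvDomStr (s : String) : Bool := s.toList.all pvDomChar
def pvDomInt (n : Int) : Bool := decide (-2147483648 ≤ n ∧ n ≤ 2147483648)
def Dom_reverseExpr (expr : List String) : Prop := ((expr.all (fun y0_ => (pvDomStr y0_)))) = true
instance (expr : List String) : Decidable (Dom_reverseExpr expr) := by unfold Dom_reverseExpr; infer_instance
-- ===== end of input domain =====

-- B maps every token of the reversed list through the flip table in one comprehension
-- (objective: idiomatic); unlike A's two-pointer loop it also flips a parenthesis sitting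
-- at the middle of an odd-length list (stated as D_ below).  Both Pythons mutate the
-- argument list in place and return it; the theorems here are about the returned value.

-- ===== PORT A =====
-- dictParen = {")":"(","(":")"}
def dictParen : PySem.Dict String String := PySem.Dict.ofList [(")", "("), ("(", ")")]

-- 'if expr[i] in dictParen: expr[i] = dictParen[expr[i]]'  (index i always in range at call sites)
def flipAt (e : List String) (i : Nat) : List String :=
  match dictParen.get? (e.getD i "") with
  | some w => e.set i w
  | none => e

-- the while loop of A, state (expr, i, j); indices are in range whenever the guard holds
def loopA (e : List String) (i j : Nat) : List String :=
  if i < j then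
    let vi := e.getD i ""
    let vj := e.getD j ""
    loopA (flipAt (flipAt ((e.set i vj).set j vi) i) j) (i + 1) (j - 1)
  else e
termination_by j - i

def reverseExpr (expr : List String) : List String :=
  loopA expr 0 (expr.length - 1)

-- ===== PORT B =====
-- flip.get(tok, tok)
def flipTok (t : String) : String := dictParen.getD t t

-- expr[:] = [flip.get(tok, tok) for tok in reversed(expr)]
def reverseExpr_alt (expr : List String) : List String :=
  expr.reverse.map flipTok

-- ===== PRECONDITION & SPEC =====
-- On odd-length lists whose middle element is "(" or ")", A's two-pointer loop never
-- visits the middle index and returns it unflipped, while B flips it like every other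
-- parenthesis; flipping all parentheses is the intended behaviour of reversing an expression.
def D_reverseExpr (expr : List String) : Prop :=
  expr.length % 2 = 1 ∧
    (expr.getD (expr.length / 2) "" = "(" ∨ expr.getD (expr.length / 2) "" = ")")
instance (expr : List String) : Decidable (D_reverseExpr expr) := by
  unfold D_reverseExpr; infer_instance

def Spec_reverseExpr (expr : List String) (out : List String) : Prop :=
  ¬ D_reverseExpr expr → out = reverseExpr_alt expr
instance (expr : List String) (out : List String) : Decidable (Spec_reverseExpr expr out) := by
  unfold Spec_reverseExpr; infer_instance

def pvDiffWitness_reverseExpr : List String := ["("]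
def pvDiffWitnessOut_reverseExpr : (List String) × (List String) := (["("], [")"])

-- ===== CLAIM (what is proved, stated in full; the proofs are below) =====
def Claim_unchanged_reverseExpr : Prop :=
  ∀ (expr : List String), Dom_reverseExpr expr → Spec_reverseExpr expr (reverseExpr expr)
def Claim_changed_reverseExpr : Prop :=
  Dom_reverseExpr (pvDiffWitness_reverseExpr) ∧ D_reverseExpr (pvDiffWitness_reverseExpr) ∧
    reverseExpr (pvDiffWitness_reverseExpr) = pvDiffWitnessOut_reverseExpr.1 ∧
    reverseExpr_alt (pvDiffWitness_reverseExpr) = pvDiffWitnessOut_reverseExpr.2 ∧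
    pvDiffWitnessOut_reverseExpr.1 ≠ pvDiffWitnessOut_reverseExpr.2
def Claim_exact_reverseExpr : Prop :=
  ∀ (expr : List String), Dom_reverseExpr expr → D_reverseExpr expr →
    reverseExpr expr ≠ reverseExpr_alt expr

-- ===== LEMMAS AND PROOFS =====

-- the abstract flip both ports implement
def pflip (s : String) : String :=
  match dictParen.get? s with
  | some w => w
  | none => s

theorem flipTok_eq_pflip (t : String) : flipTok t = pflip t := by
  unfold flipTok pflip
  rw [PySem.Dict.getD_eq_get?_getD]
  cases dictParen.get? t <;> rfl

theorem pflip_eq_self (s : String) (h1 : s ≠ "(") (h2 : s ≠ ")") : pflip s = s := by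
  unfold pflip
  have hdp : dictParen = PySem.Dict.mk [(")", "("), ("(", ")")] := by decide
  have : dictParen.get? s = none := by
    rw [hdp, PySem.Dict.get?_mk_cons, PySem.Dict.get?_mk_cons]
    simp [PySem.Dict.get?, Ne.symm h1, Ne.symm h2]
  rw [this]

theorem getD_set (e : List String) (i k : Nat) (v : String) :
    (e.set i v).getD k "" = if k = i ∧ i < e.length then v else e.getD k "" := by
  simp only [List.getD_eq_getElem?_getD, List.getElem?_set]
  split_ifs with h h1 h2 h2 <;> simp_all

theorem length_flipAt (e : List String) (i : Nat) : (flipAt e i).length = e.length := by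
  unfold flipAt; cases dictParen.get? (e.getD i "") <;> simp

theorem getD_flipAt (e : List String) (i k : Nat) :
    (flipAt e i).getD k "" = if k = i ∧ i < e.length then pflip (e.getD i "") else e.getD k "" := by
  unfold flipAt pflip
  cases h : dictParen.get? (e.getD i "") with
  | some w => rw [getD_set]
  | none =>
      split_ifs with h1
      · obtain ⟨rfl, _⟩ := h1; rfl
      · rfl

theorem length_loopA (e : List String) (i j : Nat) : (loopA e i j).length = e.length := by
  unfold loopA
  split_ifs with h
  · rw [length_loopA]; simp [length_flipAt]
  · rfl
termination_by j - i

theorem getD_loopA (e : List String) (i j k : Nat) (hj : j < e.length) :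
    (loopA e i j).getD k "" =
      if i ≤ k ∧ k ≤ j ∧ 2 * k ≠ i + j then pflip (e.getD (i + j - k) "")
      else e.getD k "" := by
  unfold loopA
  split_ifs with h hc hc
  · -- loop runs, k in the flipped region [i,j] (not the middle)
    set e1 := (e.set i (e.getD j "")).set j (e.getD i "") with he1
    have hl1 : e1.length = e.length := by simp [he1]
    have hij : i < e.length := lt_trans h hj
    have hval : ∀ m, m < e.length →
        (flipAt (flipAt e1 i) j).getD m "" =
          if m = i then pflip (e.getD j "") else if m = j then pflip (e.getD i "")
          else e.getD m "" := by
      intro m hm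
      have hji : j ≠ i := by omega
      simp only [getD_flipAt, length_flipAt, he1, getD_set, List.length_set]
      by_cases h1 : m = i <;> by_cases h2 : m = j <;>
        simp_all
    rw [getD_loopA _ _ _ _ (by rw [length_flipAt, length_flipAt, hl1]; omega)]
    by_cases hki : k = i
    · rw [hki, if_neg (by omega), hval _ hij, if_pos rfl]
      have hx : i + j - i = j := by omega
      rw [hx]
    · by_cases hkj : k = j
      · have hji : j ≠ i := by omega
        rw [hkj, if_neg (by omega), hval _ hj, if_neg hji, if_pos rfl]
        have hx : i + j - j = i := by omega
        rw [hx]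
      · -- k strictly interior
        have hint : i < k ∧ k < j := by omega
        have hidx : i + 1 + (j - 1) - k = i + j - k := by omega
        rw [if_pos (by omega), hidx, hval _ (by omega), if_neg (by omega),
          if_neg (by omega)]
  · -- loop runs, k outside the region (or the middle element)
    set e1 := (e.set i (e.getD j "")).set j (e.getD i "") with he1
    have hl1 : e1.length = e.length := by simp [he1]
    have hij : i < e.length := lt_trans h hj
    have hval : ∀ m, m < e.length →
        (flipAt (flipAt e1 i) j).getD m "" =
          if m = i then pflip (e.getD j "") else if m = j then pflip (e.getD i "")
          else e.getD m "" := by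
      intro m hm
      have hji : j ≠ i := by omega
      simp only [getD_flipAt, length_flipAt, he1, getD_set, List.length_set]
      by_cases h1 : m = i <;> by_cases h2 : m = j <;>
        simp_all
    rw [getD_loopA _ _ _ _ (by rw [length_flipAt, length_flipAt, hl1]; omega)]
    rw [if_neg (by omega)]
    by_cases hke : k < e.length
    · rw [hval _ hke, if_neg (by omega), if_neg (by omega)]
    · have h1 : e.getD k "" = "" := by
        rw [List.getD_eq_getElem?_getD, List.getElem?_eq_none (by omega : e.length ≤ k)]
        rfl
      have h2 : (flipAt (flipAt e1 i) j).getD k "" = "" := by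
        have hlen : (flipAt (flipAt e1 i) j).length ≤ k := by
          rw [length_flipAt, length_flipAt, hl1]; omega
        rw [List.getD_eq_getElem?_getD, List.getElem?_eq_none hlen]
        rfl
      rw [h1, h2]
  · omega
  · rfl
termination_by j - i

theorem getD_altB (e : List String) (k : Nat) (hk : k < e.length) :
    (reverseExpr_alt e).getD k "" = pflip (e.getD (e.length - 1 - k) "") := by
  unfold reverseExpr_alt
  rw [List.getD_eq_getElem?_getD, List.getElem?_map,
    List.getElem?_reverse (by simpa using hk)]
  rw [List.getElem?_eq_getElem (by omega), List.getD_eq_getElem?_getD,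
    List.getElem?_eq_getElem (by omega)]
  simp [flipTok_eq_pflip]

theorem length_altB (e : List String) : (reverseExpr_alt e).length = e.length := by
  simp [reverseExpr_alt]

theorem getD_reverseExpr (e : List String) (k : Nat) (hk : k < e.length) :
    (reverseExpr e).getD k "" =
      if 2 * k = e.length - 1 then e.getD k ""
      else pflip (e.getD (e.length - 1 - k) "") := by
  unfold reverseExpr
  rw [getD_loopA e 0 (e.length - 1) k (by omega)]
  by_cases hmid : 2 * k = e.length - 1
  · rw [if_pos hmid, if_neg (by omega)]
  · rw [if_neg hmid, if_pos (by omega)]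
    have hx : 0 + (e.length - 1) - k = e.length - 1 - k := by omega
    rw [hx]

-- ===== VERDICT (by name: the statements are the Claim_ definitions above) =====
theorem reverseExpr_spec : Claim_unchanged_reverseExpr := by
  intro expr _ hnd
  unfold reverseExpr_alt
  rw [← reverseExpr_alt]
  have hlen : (reverseExpr expr).length = (reverseExpr_alt expr).length := by
    rw [length_altB]; unfold reverseExpr; rw [length_loopA]
  apply List.ext_getElem hlen
  intro k hk1 hk2
  have hkn : k < expr.length := by
    rw [length_altB] at hk2; exact hk2
  have hA : (reverseExpr expr)[k] = (reverseExpr expr).getD k "" := by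
    rw [List.getD_eq_getElem?_getD, List.getElem?_eq_getElem hk1]; rfl
  have hB : (reverseExpr_alt expr)[k] = (reverseExpr_alt expr).getD k "" := by
    rw [List.getD_eq_getElem?_getD, List.getElem?_eq_getElem hk2]; rfl
  rw [hA, hB, getD_reverseExpr expr k hkn, getD_altB expr k hkn]
  by_cases hmid : 2 * k = expr.length - 1
  · rw [if_pos hmid]
    have hk' : expr.length - 1 - k = k := by omega
    rw [hk']
    have hodd : expr.length % 2 = 1 := by omega
    have hkd : k = expr.length / 2 := by omega
    have hnp : expr.getD k "" ≠ "(" ∧ expr.getD k "" ≠ ")" := by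
      by_contra hcon
      push Not at hcon
      apply hnd
      refine ⟨hodd, ?_⟩
      rw [← hkd]
      by_cases h1 : expr.getD k "" = "("
      · exact Or.inl h1
      · exact Or.inr (hcon h1)
    rw [pflip_eq_self _ hnp.1 hnp.2]
  · rw [if_neg hmid]

theorem reverseExpr_changed : Claim_changed_reverseExpr := by
  unfold Claim_changed_reverseExpr
  refine ⟨by decide, by decide, ?_, by decide, by decide⟩
  show loopA ["("] 0 (["("].length - 1) = ["("]
  rw [loopA]
  simp

theorem reverseExpr_tight : Claim_exact_reverseExpr := by
  intro expr _ hd heq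
  obtain ⟨hodd, hmid⟩ := hd
  have hpos : 0 < expr.length := by omega
  set m := expr.length / 2 with hm
  have hkm : m < expr.length := by omega
  have h2m : 2 * m = expr.length - 1 := by omega
  have hval : (reverseExpr expr).getD m "" = (reverseExpr_alt expr).getD m "" := by
    rw [heq]
  rw [getD_reverseExpr expr m hkm, if_pos h2m, getD_altB expr m hkm] at hval
  have hx : expr.length - 1 - m = m := by omega
  rw [hx] at hval
  rcases hmid with h | h <;> rw [h] at hval <;>
    · have : pflip _ = _ := hval.symm
      revert this
      decide
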